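-- pv_equiv track=rewrite | github.com/oudeng/LGO | utility_analysis/07_gen_thresholds_units.py | iter_calls
-- ===== SOURCE A (Python) =====
-- def iter_calls(expr: str, fname: str):
--     """Yield (start_idx, end_idx, inside) for each fname(...) in expr."""
--     if not isinstance(expr, str):
--         return
--     needle = fname + "("
--     i = 0
--     L = len(expr)
--     while i < L:
--         j = expr.find(needle, i)
--         if j < 0:
--             break
--         # find matching ')'
--         k = j + len(needle)
--         depth = 1
--         start = k
--         while k < L and depth > 0:
--             ch = expr[k]
--             if ch == "(":
--                 depth += 1
--             elif ch == ")":
--                 depth -= 1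
--             k += 1
--         end = k - 1
--         inside = expr[start:end]
--         yield j, k, inside
--         i = k
-- ===== SOURCE B (Python) =====
-- def iter_calls(expr: str, fname: str):
--     """Yield (start_idx, end_idx, inside) for each fname(...) in expr."""
--     if not isinstance(expr, str):
--         return
--     L = len(expr)
--     # one pass: map each '(' index to the index just past its matching ')'
--     match = {}
--     stack = []
--     for idx, ch in enumerate(expr):
--         if ch == "(":
--             stack.append(idx)
--         elif ch == ")":
--             if stack:
--                 match[stack.pop()] = idx + 1
--     needle = fname + "("
--     i = 0
--     while True:
--         j = expr.find(needle, i)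
--         if j < 0:
--             return
--         k = match.get(j + len(fname), L)  # unmatched '(' closes at L
--         yield j, k, expr[j + len(needle):k - 1]
--         i = k
-- ===== Notes on version B (the rewrite author's own statement) =====
-- stated objective: alternative
-- what changed: A re-scans forward from each call site counting paren depth to find the matching ')'; B instead makes one stack pass over expr building a dict from each '(' index to the index just past its matching ')', then resolves every fname( occurrence by a single dict lookup (unmatched '(' falls back to len(expr), reproducing A's run-to-end case).
import Mathlib
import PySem

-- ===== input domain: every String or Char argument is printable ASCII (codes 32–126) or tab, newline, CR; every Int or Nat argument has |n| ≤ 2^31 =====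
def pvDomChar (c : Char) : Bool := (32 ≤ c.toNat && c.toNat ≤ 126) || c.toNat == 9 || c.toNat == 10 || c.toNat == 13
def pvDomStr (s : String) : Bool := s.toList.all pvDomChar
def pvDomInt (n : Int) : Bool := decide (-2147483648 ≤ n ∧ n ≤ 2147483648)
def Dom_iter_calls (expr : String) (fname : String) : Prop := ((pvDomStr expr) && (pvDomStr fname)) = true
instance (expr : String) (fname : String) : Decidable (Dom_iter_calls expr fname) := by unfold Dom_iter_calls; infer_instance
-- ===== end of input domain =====

-- B replaces A's per-call depth scan by one stack pass building a table '(' index → index past its matching ')'; equal return values proved.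

-- ===== PORT A =====
-- inner while loop of A: advance k while k < L and depth > 0
def pvScanA (s : List Char) (k : Nat) (depth : Int) : Nat :=
  if h : k < s.length ∧ 0 < depth then
    let ch := s[k]'h.1
    pvScanA s (k + 1) (if ch = '(' then depth + 1 else if ch = ')' then depth - 1 else depth)
  else k
termination_by s.length - k
decreasing_by exact Nat.sub_succ_lt_self _ _ h.1

-- needed by pvLoopA's termination
theorem pvScanA_ge (s : List Char) (k : Nat) (depth : Int) : k ≤ pvScanA s k depth := by
  rw [pvScanA]
  split
  · exact Nat.le_trans (Nat.le_succ k) (pvScanA_ge s (k + 1) _)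
  · exact Nat.le_refl k
termination_by s.length - k
decreasing_by omega

-- needed by pvLoopA's termination
theorem pvLoopA_dec (s needle : List Char) (i : Nat) (hne : needle ≠ [])
    (hi : i < s.length) (hj : ¬ PySem.Chars.findFrom s needle (i : Int) none < 0) :
    s.length - pvScanA s ((PySem.Chars.findFrom s needle (i : Int) none).toNat + needle.length) 1 < s.length - i := by
  have h1 := PySem.Chars.findFrom_natCast_spec s needle i (Nat.le_of_lt hi)
      (fun h => hj (by rw [h]; norm_num))
  have h2 := pvScanA_ge s ((PySem.Chars.findFrom s needle (i : Int) none).toNat + needle.length) 1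
  have h3 : 1 ≤ needle.length := by cases needle with | nil => exact absurd rfl hne | cons a l => simp
  have h4 := h1.1
  omega

-- outer while loop of A (hne: the needle fname+"(" is never empty)
def pvLoopA (s needle : List Char) (i : Nat) (hne : needle ≠ []) : List (Int × Int × String) :=
  if hi : i < s.length then
    if hj : PySem.Chars.findFrom s needle (i : Int) none < 0 then []
    else
      (PySem.Chars.findFrom s needle (i : Int) none,
       ((pvScanA s ((PySem.Chars.findFrom s needle (i : Int) none).toNat + needle.length) 1 : Nat) : Int),
       String.ofList (PySem.List.slice s
         (some (((PySem.Chars.findFrom s needle (i : Int) none).toNat + needle.length : Nat) : Int))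
         (some (((pvScanA s ((PySem.Chars.findFrom s needle (i : Int) none).toNat + needle.length) 1 : Nat) : Int) - 1)))) ::
      pvLoopA s needle (pvScanA s ((PySem.Chars.findFrom s needle (i : Int) none).toNat + needle.length) 1) hne
  else []
termination_by s.length - i
decreasing_by exact pvLoopA_dec s needle i hne hi hj

def iter_calls (expr : String) (fname : String) : List (Int × Int × String) :=
  pvLoopA expr.toList (fname.toList ++ ['(']) 0 (by simp)

-- ===== PORT B =====
-- one pass over expr: stack of open-'(' indices; table maps each '(' index to index just past its ')'
def pvBuild (s : List Char) (idx : Nat) (stack : List Nat) (d : PySem.Dict Nat Nat) : PySem.Dict Nat Nat :=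
  match s with
  | [] => d
  | ch :: rest =>
    if ch = '(' then pvBuild rest (idx + 1) (idx :: stack) d
    else if ch = ')' then
      match stack with
      | [] => pvBuild rest (idx + 1) [] d
      | p :: st => pvBuild rest (idx + 1) st (d.insert p (idx + 1))
    else pvBuild rest (idx + 1) stack d

-- needed by pvLoopB's termination: every table entry satisfies key < value ≤ idx + remaining length
theorem pvBuild_vals (s : List Char) (idx : Nat) (stack : List Nat) (d : PySem.Dict Nat Nat)
    (hst : ∀ q ∈ stack, q < idx) (hd : ∀ q v, d.get? q = some v → q < v ∧ v ≤ idx) :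
    ∀ q v, (pvBuild s idx stack d).get? q = some v → q < v ∧ v ≤ idx + s.length := by
  induction s generalizing idx stack d with
  | nil => intro q v h; have := hd q v h; simpa using ⟨this.1, Nat.le_trans this.2 (Nat.le_refl _)⟩
  | cons ch rest ih =>
    intro q v h
    by_cases h1 : ch = '('
    · rw [show pvBuild (ch :: rest) idx stack d = pvBuild rest (idx + 1) (idx :: stack) d by
        simp [pvBuild, h1]] at h
      have := ih (idx + 1) (idx :: stack) d
        (by intro q hq; simp at hq; rcases hq with rfl | hq
            · omega
            · exact Nat.lt_succ_of_lt (hst _ hq))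
        (by intro q v hqv; have := hd q v hqv; omega) q v h
      simp at this ⊢; omega
    · by_cases h2 : ch = ')'
      · cases stack with
        | nil =>
          rw [show pvBuild (ch :: rest) idx [] d = pvBuild rest (idx + 1) [] d by
            simp [pvBuild, h1, h2]] at h
          have := ih (idx + 1) [] d (by simp) (by intro q v hqv; have := hd q v hqv; omega) q v h
          simp at this ⊢; omega
        | cons p st =>
          rw [show pvBuild (ch :: rest) idx (p :: st) d = pvBuild rest (idx + 1) st (d.insert p (idx + 1)) by
            simp [pvBuild, h1, h2]] at h
          have hp : p < idx := hst p (by simp)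
          have := ih (idx + 1) st (d.insert p (idx + 1))
            (by intro q hq; exact Nat.lt_succ_of_lt (hst _ (List.mem_cons_of_mem _ hq)))
            (by intro q v hqv
                rw [PySem.Dict.get?_insert] at hqv
                split at hqv
                · rename_i hq; cases hqv; subst hq; omega
                · have := hd q v hqv; omega) q v h
          simp at this ⊢; omega
      · rw [show pvBuild (ch :: rest) idx stack d = pvBuild rest (idx + 1) stack d by
          simp [pvBuild, h1, h2]] at h
        have := ih (idx + 1) stack d
          (by intro q hq; exact Nat.lt_succ_of_lt (hst _ hq))
          (by intro q v hqv; have := hd q v hqv; omega) q v h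
        simp at this ⊢; omega

-- needed by pvLoopB (recursion argument bound)
theorem pvTableLe (L : Nat) (table : PySem.Dict Nat Nat) (p : Nat)
    (htab : ∀ q v, table.get? q = some v → q < v ∧ v ≤ L) : table.getD p L ≤ L := by
  rw [PySem.Dict.getD_eq_get?_getD]
  cases hg : table.get? p with
  | none => simp
  | some v => simpa using (htab _ _ hg).2

-- needed by pvLoopB's termination
theorem pvLoopB_dec (s fnameL needleL : List Char) (table : PySem.Dict Nat Nat) (i : Nat)
    (hi : i ≤ s.length)
    (htab : ∀ q v, table.get? q = some v → q < v ∧ v ≤ s.length)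
    (hne : needleL ≠ [])
    (hj : ¬ PySem.Chars.findFrom s needleL (i : Int) none < 0) :
    s.length - table.getD ((PySem.Chars.findFrom s needleL (i : Int) none).toNat + fnameL.length) s.length
      < s.length - i := by
  have hspec := PySem.Chars.findFrom_natCast_spec s needleL i hi (fun h => hj (by rw [h]; norm_num))
  have hiL : i < s.length := by
    rcases Nat.lt_or_ge i s.length with h | h
    · exact h
    · have hieq : i = s.length := Nat.le_antisymm hi h
      exfalso
      apply hj
      rw [hieq, (PySem.Chars.findFrom_natCast_eq_neg_one_iff s needleL s.length (Nat.le_refl _)).2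
        (by rw [List.drop_length]; simpa [List.infix_nil] using hne)]
      norm_num
  have h4 := hspec.1
  rw [PySem.Dict.getD_eq_get?_getD]
  cases hg : table.get? ((PySem.Chars.findFrom s needleL (i : Int) none).toNat + fnameL.length) with
  | none => simp; omega
  | some v =>
    have := htab _ _ hg
    simp only [Option.getD_some]
    omega

-- while True loop of B (carries i ≤ len and the table invariant for termination)
def pvLoopB (s fnameL needleL : List Char) (table : PySem.Dict Nat Nat) (i : Nat)
    (hi : i ≤ s.length)
    (htab : ∀ q v, table.get? q = some v → q < v ∧ v ≤ s.length)
    (hne : needleL ≠ []) : List (Int × Int × String) :=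
  if hj : PySem.Chars.findFrom s needleL (i : Int) none < 0 then []
  else
    have hkle : table.getD ((PySem.Chars.findFrom s needleL (i : Int) none).toNat + fnameL.length) s.length ≤ s.length :=
      pvTableLe s.length table _ htab
    (PySem.Chars.findFrom s needleL (i : Int) none,
     ((table.getD ((PySem.Chars.findFrom s needleL (i : Int) none).toNat + fnameL.length) s.length : Nat) : Int),
     String.ofList (PySem.List.slice s
       (some (((PySem.Chars.findFrom s needleL (i : Int) none).toNat + needleL.length : Nat) : Int))
       (some (((table.getD ((PySem.Chars.findFrom s needleL (i : Int) none).toNat + fnameL.length) s.length : Nat) : Int) - 1)))) ::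
    pvLoopB s fnameL needleL table
      (table.getD ((PySem.Chars.findFrom s needleL (i : Int) none).toNat + fnameL.length) s.length) hkle htab hne
termination_by s.length - i
decreasing_by exact pvLoopB_dec s fnameL needleL table i hi htab hne hj

-- table invariant at the top-level call
theorem pvTableInv (s : List Char) :
    ∀ q v, (pvBuild s 0 [] PySem.Dict.empty).get? q = some v → q < v ∧ v ≤ s.length := by
  intro q v h
  simpa using pvBuild_vals s 0 [] PySem.Dict.empty (by simp)
    (by intro q v h; rw [PySem.Dict.get?_empty] at h; cases h) q v h

def iter_calls_alt (expr : String) (fname : String) : List (Int × Int × String) :=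
  pvLoopB expr.toList fname.toList (fname.toList ++ ['('])
    (pvBuild expr.toList 0 [] PySem.Dict.empty) 0 (Nat.zero_le _)
    (pvTableInv expr.toList)
    (by simp)

-- ===== PRECONDITION & SPEC =====
def Spec_iter_calls (expr : String) (fname : String) (out : List (Int × Int × String)) : Prop := out = iter_calls_alt expr fname
instance (expr : String) (fname : String) (out : List (Int × Int × String)) : Decidable (Spec_iter_calls expr fname out) := by unfold Spec_iter_calls; infer_instance

-- ===== CLAIM (what is proved, stated in full; the proofs are below) =====
def Claim_equal_iter_calls : Prop := ∀ (expr : String) (fname : String), Dom_iter_calls expr fname → Spec_iter_calls expr fname (iter_calls expr fname)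

-- ===== LEMMAS AND PROOFS =====

-- reference depth scan on a suffix: chars consumed until depth (starting at d) first hits 0, none if never
def pvScanD : List Char → Nat → Option Nat
  | [], _ => none
  | c :: r, d =>
    if c = '(' then (pvScanD r (d + 1)).map (· + 1)
    else if c = ')' then
      if d = 1 then some 1 else (pvScanD r (d - 1)).map (· + 1)
    else (pvScanD r d).map (· + 1)

theorem pvScanA_eq (s : List Char) (t : List Char) (k n : Nat) (hn : 1 ≤ n)
    (hk : k ≤ s.length) (hdrop : s.drop k = t) :
    pvScanA s k (n : Int) = (pvScanD t n).elim s.length (fun c => k + c) := by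
  induction t generalizing k n with
  | nil =>
    have hkl : s.length ≤ k := by
      have := congrArg List.length hdrop; simp at this; omega
    rw [pvScanA, dif_neg (by omega)]
    simp [pvScanD]; omega
  | cons c r ih =>
    have hkl : k < s.length := by
      have := congrArg List.length hdrop; simp at this; omega
    have hck : ∀ (h : k < s.length), s[k]'h = c := by
      intro h
      have h1 : (List.drop k s)[0]? = s[k + 0]? := List.getElem?_drop
      rw [hdrop] at h1
      simp at h1
      simpa [List.getElem?_eq_getElem h] using h1.symm
    have hdrop' : s.drop (k + 1) = r := by
      have h2 : s.drop (k + 1) = (s.drop k).drop 1 := by rw [List.drop_drop]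
      rw [h2, hdrop]; rfl
    rw [pvScanA, dif_pos ⟨hkl, by exact_mod_cast Nat.lt_of_lt_of_le Nat.zero_lt_one hn⟩]
    simp only [hck]
    by_cases h1 : c = '('
    · rw [if_pos h1]
      have hih := ih (k + 1) (n + 1) (by omega) (by omega) hdrop'
      push_cast at hih
      rw [hih]
      cases h : pvScanD r (n + 1) with
      | none => simp [pvScanD, h1, h]
      | some c' => simp [pvScanD, h1, h]; omega
    · by_cases h2 : c = ')'
      · rw [if_neg h1, if_pos h2]
        by_cases h3 : n = 1
        · subst h3
          rw [show ((1 : Nat) : Int) - 1 = ((0 : Nat) : Int) by norm_num]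
          rw [pvScanA, dif_neg (by simp)]
          simp [pvScanD, h1, h2]
        · have hcast : ((n : Nat) : Int) - 1 = ((n - 1 : Nat) : Int) := by omega
          rw [hcast]
          have hih := ih (k + 1) (n - 1) (by omega) (by omega) hdrop'
          rw [hih]
          cases h : pvScanD r (n - 1) with
          | none => simp [pvScanD, h1, h2, h3, h]
          | some c' => simp [pvScanD, h1, h2, h3, h]; omega
      · rw [if_neg h1, if_neg h2]
        have hih := ih (k + 1) n hn (by omega) hdrop'
        rw [hih]
        cases h : pvScanD r n with
        | none => simp [pvScanD, h1, h2, h]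
        | some c' => simp [pvScanD, h1, h2, h]; omega

theorem pvBuild_notouch (s : List Char) (idx : Nat) (st : List Nat) (d : PySem.Dict Nat Nat) (p : Nat)
    (hp : p ∉ st) (hlt : p < idx) : (pvBuild s idx st d).get? p = d.get? p := by
  induction s generalizing idx st d with
  | nil => rfl
  | cons ch rest ih =>
    by_cases h1 : ch = '('
    · rw [show pvBuild (ch :: rest) idx st d = pvBuild rest (idx + 1) (idx :: st) d by
        simp [pvBuild, h1]]
      exact ih (idx + 1) (idx :: st) d (by simp; exact ⟨by omega, hp⟩) (by omega)
    · by_cases h2 : ch = ')'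
      · cases st with
        | nil =>
          rw [show pvBuild (ch :: rest) idx [] d = pvBuild rest (idx + 1) [] d by
            simp [pvBuild, h1, h2]]
          exact ih (idx + 1) [] d (by simp) (by omega)
        | cons q st' =>
          rw [show pvBuild (ch :: rest) idx (q :: st') d
              = pvBuild rest (idx + 1) st' (d.insert q (idx + 1)) by simp [pvBuild, h1, h2]]
          simp at hp
          rw [ih (idx + 1) st' (d.insert q (idx + 1)) hp.2 (by omega)]
          rw [PySem.Dict.get?_insert, if_neg hp.1]
      · rw [show pvBuild (ch :: rest) idx st d = pvBuild rest (idx + 1) st d by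
          simp [pvBuild, h1, h2]]
        exact ih (idx + 1) st d hp (by omega)

theorem pvBuild_top (s : List Char) (idx : Nat) (stk : List Nat) (p : Nat) (st : List Nat)
    (d : PySem.Dict Nat Nat) (hp1 : p ∉ stk) (hp2 : p ∉ st) (hlt : p < idx) :
    (pvBuild s idx (stk ++ p :: st) d).get? p =
      (pvScanD s (stk.length + 1)).elim (d.get? p) (fun c => some (idx + c)) := by
  induction s generalizing idx stk d with
  | nil => simp [pvBuild, pvScanD]
  | cons ch r ih =>
    by_cases h1 : ch = '('
    · rw [show pvBuild (ch :: r) idx (stk ++ p :: st) d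
          = pvBuild r (idx + 1) ((idx :: stk) ++ p :: st) d by simp [pvBuild, h1]]
      rw [ih (idx + 1) (idx :: stk) d (by simp; exact ⟨by omega, hp1⟩) (by omega)]
      simp only [List.length_cons]
      cases h : pvScanD r (stk.length + 1 + 1) with
      | none => simp [pvScanD, h1, h]
      | some c => simp [pvScanD, h1, h]; omega
    · by_cases h2 : ch = ')'
      · cases stk with
        | nil =>
          rw [show pvBuild (ch :: r) idx ([] ++ p :: st) d
              = pvBuild r (idx + 1) st (d.insert p (idx + 1)) by simp [pvBuild, h1, h2]]
          rw [pvBuild_notouch r (idx + 1) st (d.insert p (idx + 1)) p hp2 (by omega)]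
          rw [PySem.Dict.get?_insert_self]
          simp [pvScanD, h1, h2]
        | cons q stk' =>
          rw [show pvBuild (ch :: r) idx ((q :: stk') ++ p :: st) d
              = pvBuild r (idx + 1) (stk' ++ p :: st) (d.insert q (idx + 1)) by
            simp [pvBuild, h1, h2]]
          simp at hp1
          rw [ih (idx + 1) stk' (d.insert q (idx + 1)) hp1.2 (by omega)]
          rw [PySem.Dict.get?_insert, if_neg hp1.1]
          cases h : pvScanD r (stk'.length + 1) with
          | none => simp [pvScanD, h1, h2, h]
          | some c => simp [pvScanD, h1, h2, h]; omega
      · rw [show pvBuild (ch :: r) idx (stk ++ p :: st) d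
            = pvBuild r (idx + 1) (stk ++ p :: st) d by simp [pvBuild, h1, h2]]
        rw [ih (idx + 1) stk d hp1 (by omega)]
        cases h : pvScanD r (stk.length + 1) with
        | none => simp [pvScanD, h1, h2, h]
        | some c => simp [pvScanD, h1, h2, h]; omega

theorem pvBuild_char (s : List Char) (idx : Nat) (st : List Nat) (d : PySem.Dict Nat Nat) (p : Nat)
    (hst : ∀ q ∈ st, q < idx) (hd : ∀ q v, d.get? q = some v → q < idx)
    (hip : idx ≤ p) (hc : s[p - idx]? = some '(') :
    (pvBuild s idx st d).get? p = (pvScanD (s.drop (p - idx + 1)) 1).map (fun c => p + 1 + c) := by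
  induction s generalizing idx st d with
  | nil => simp at hc
  | cons ch r ih =>
    by_cases hpi : p = idx
    · subst hpi
      simp at hc
      subst hc
      rw [show pvBuild ('(' :: r) p st d = pvBuild r (p + 1) ([] ++ p :: st) d by simp [pvBuild]]
      rw [pvBuild_top r (p + 1) [] p st d (by simp) (fun hmem => absurd (hst _ hmem) (lt_irrefl p)) (by omega)]
      have hdn : d.get? p = none := by
        cases hg : d.get? p with
        | none => rfl
        | some v => exact absurd (hd _ _ hg) (lt_irrefl p)
      rw [hdn]
      simp only [Nat.sub_self, Nat.zero_add, List.drop_succ_cons, List.drop_zero, List.length_nil]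
      cases h : pvScanD r 1 with
      | none => simp [h]
      | some c => simp [h]
    · have hlt : idx < p := Nat.lt_of_le_of_ne hip (fun h => hpi h.symm)
      obtain ⟨m, hm⟩ : ∃ m, p - idx = m + 1 := ⟨p - idx - 1, by omega⟩
      have hc' : r[p - (idx + 1)]? = some '(' := by
        rw [hm] at hc
        simpa [show p - (idx + 1) = m by omega] using hc
      have hdropeq : (ch :: r).drop (p - idx + 1) = r.drop (p - (idx + 1) + 1) := by
        rw [hm, List.drop_succ_cons]
        congr 1
        omega
      rw [hdropeq]
      by_cases h1 : ch = '('
      · rw [show pvBuild (ch :: r) idx st d = pvBuild r (idx + 1) (idx :: st) d by simp [pvBuild, h1]]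
        exact ih (idx + 1) (idx :: st) d
          (by intro q hq; simp at hq; rcases hq with rfl | hq
              · omega
              · exact Nat.lt_succ_of_lt (hst _ hq))
          (fun q v h => Nat.lt_succ_of_lt (hd q v h)) (by omega) hc'
      · by_cases h2 : ch = ')'
        · cases st with
          | nil =>
            rw [show pvBuild (ch :: r) idx [] d = pvBuild r (idx + 1) [] d by simp [pvBuild, h1, h2]]
            exact ih (idx + 1) [] d (by simp) (fun q v h => Nat.lt_succ_of_lt (hd q v h)) (by omega) hc'
          | cons q st' =>
            rw [show pvBuild (ch :: r) idx (q :: st') d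
                = pvBuild r (idx + 1) st' (d.insert q (idx + 1)) by simp [pvBuild, h1, h2]]
            refine ih (idx + 1) st' (d.insert q (idx + 1))
              (by intro x hx; exact Nat.lt_succ_of_lt (hst _ (List.mem_cons_of_mem _ hx)))
              ?_ (by omega) hc'
            intro x v h
            rw [PySem.Dict.get?_insert] at h
            split at h
            · rename_i hx
              subst hx
              exact Nat.lt_succ_of_lt (hst _ (by simp))
            · exact Nat.lt_succ_of_lt (hd _ _ h)
        · rw [show pvBuild (ch :: r) idx st d = pvBuild r (idx + 1) st d by simp [pvBuild, h1, h2]]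
          exact ih (idx + 1) st d (fun q hq => Nat.lt_succ_of_lt (hst _ hq))
            (fun q v h => Nat.lt_succ_of_lt (hd q v h)) (by omega) hc'

theorem loops_eq (s fnameL : List Char) (i : Nat) (hi : i ≤ s.length)
    (htab : ∀ q v, (pvBuild s 0 [] PySem.Dict.empty).get? q = some v → q < v ∧ v ≤ s.length)
    (hneA : fnameL ++ ['('] ≠ []) (hneB : fnameL ++ ['('] ≠ []) :
    pvLoopA s (fnameL ++ ['(']) i hneA =
      pvLoopB s fnameL (fnameL ++ ['(']) (pvBuild s 0 [] PySem.Dict.empty) i hi htab hneB := by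
  rw [pvLoopA, pvLoopB]
  by_cases hiL : i < s.length
  case neg =>
    rw [dif_neg hiL]
    have hieq : i = s.length := Nat.le_antisymm hi (Nat.le_of_not_lt hiL)
    rw [dif_pos (by
      rw [hieq, (PySem.Chars.findFrom_natCast_eq_neg_one_iff s (fnameL ++ ['(']) s.length (Nat.le_refl _)).2
        (by rw [List.drop_length]; simpa [List.infix_nil] using hneB)]
      norm_num)]
  case pos =>
    rw [dif_pos hiL]
    by_cases hj : PySem.Chars.findFrom s (fnameL ++ ['(']) (i : Int) none < 0
    · rw [dif_pos hj, dif_pos hj]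
    · rw [dif_neg hj, dif_neg hj]
      have hspec := PySem.Chars.findFrom_natCast_spec s (fnameL ++ ['(']) i (Nat.le_of_lt hiL)
        (fun h => hj (by rw [h]; norm_num))
      have hpre := hspec.2.1
      obtain ⟨t, ht⟩ := hpre
      have hlenp : (fnameL ++ ['(']).length ≤ s.length - (PySem.Chars.findFrom s (fnameL ++ ['(']) (i : Int) none).toNat := by
        have := List.IsPrefix.length_le ⟨t, ht⟩
        simpa [List.length_drop] using this
      have hlen : (PySem.Chars.findFrom s (fnameL ++ ['(']) (i : Int) none).toNat + fnameL.length + 1 ≤ s.length := by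
        simp only [List.length_append, List.length_cons, List.length_nil] at hlenp
        omega
      have hcp : s[(PySem.Chars.findFrom s (fnameL ++ ['(']) (i : Int) none).toNat + fnameL.length]? = some '(' := by
        have h0 : (List.drop (PySem.Chars.findFrom s (fnameL ++ ['(']) (i : Int) none).toNat s)[fnameL.length]?
            = s[(PySem.Chars.findFrom s (fnameL ++ ['(']) (i : Int) none).toNat + fnameL.length]? := List.getElem?_drop
        rw [← h0, ← ht]
        rw [show fnameL ++ ['('] ++ t = fnameL ++ ('(' :: t) by simp]
        rw [List.getElem?_append_right (Nat.le_refl _)]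
        simp
      have harg : (PySem.Chars.findFrom s (fnameL ++ ['(']) (i : Int) none).toNat + (fnameL ++ ['(']).length
          = ((PySem.Chars.findFrom s (fnameL ++ ['(']) (i : Int) none).toNat + fnameL.length) + 1 := by
        simp only [List.length_append, List.length_cons, List.length_nil]
        omega
      have hget := pvBuild_char s 0 [] PySem.Dict.empty
        ((PySem.Chars.findFrom s (fnameL ++ ['(']) (i : Int) none).toNat + fnameL.length)
        (by simp) (by intro q v h; rw [PySem.Dict.get?_empty] at h; cases h) (Nat.zero_le _)
        (by simpa using hcp)
      have hkeq : pvScanA s ((PySem.Chars.findFrom s (fnameL ++ ['(']) (i : Int) none).toNat + (fnameL ++ ['(']).length) 1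
          = (pvBuild s 0 [] PySem.Dict.empty).getD
              ((PySem.Chars.findFrom s (fnameL ++ ['(']) (i : Int) none).toNat + fnameL.length) s.length := by
        rw [harg]
        rw [show (1 : Int) = ((1 : Nat) : Int) by norm_num]
        rw [pvScanA_eq s (s.drop (((PySem.Chars.findFrom s (fnameL ++ ['(']) (i : Int) none).toNat + fnameL.length) + 1))
          _ 1 (Nat.le_refl 1) (by omega) rfl]
        rw [PySem.Dict.getD_eq_get?_getD, hget]
        simp only [Nat.sub_zero]
        cases h : pvScanD (s.drop (((PySem.Chars.findFrom s (fnameL ++ ['(']) (i : Int) none).toNat + fnameL.length) + 1)) 1 with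
        | none => simp [h]
        | some c => simp [h]
      rw [hkeq]
      congr 1
      exact loops_eq s fnameL _ _ htab hneA hneB
termination_by s.length - i
decreasing_by exact pvLoopB_dec s fnameL (fnameL ++ ['(']) (pvBuild s 0 [] PySem.Dict.empty) i hi htab hneB hj

-- ===== VERDICT (by name: the statement is the Claim_ definition above) =====
theorem iter_calls_spec : Claim_equal_iter_calls := by
  intro expr fname _
  unfold Spec_iter_calls iter_calls iter_calls_alt
  exact loops_eq expr.toList fname.toList 0 (Nat.zero_le _) (pvTableInv expr.toList) (by simp) (by simp)
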